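-- pv_equiv track=rewrite | github.com/Merylad/DI-Bootcamp-Stage1 | DI_Bootcamp_April2023/Week2/day4/DailyChallenge/dailychallenge.py | decrypt_matrix
-- ===== SOURCE A (Python) =====
-- def decrypt_matrix(mat):
--
--     sentence = ""
--     previous = ''
--
--     for col in range(len(mat[0])):
--         for row in mat:
--             if row[col].isalpha() == True:
--                 sentence += row[col]
--             elif row[col].isalpha() == False and previous.isalpha() == False :
--                 pass
--             else :
--                 sentence+= ' '
--             previous = row[col]
--
--     return sentence
-- ===== SOURCE B (Python) =====
-- def decrypt_matrix(mat):
--     # Flatten column-major, then emit maximal runs: alphabetic runs joined,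
--     # each later non-alphabetic run collapsed to a single space.
--     cells = [row[col] for col in range(len(mat[0])) for row in mat]
--     parts = []
--     i = 0
--     n = len(cells)
--     while i < n:
--         k = cells[i].isalpha()
--         j = i + 1
--         while j < n and cells[j].isalpha() == k:
--             j += 1
--         if k:
--             parts.append(''.join(cells[i:j]))
--         elif parts:
--             parts.append(' ')
--         i = j
--     return ''.join(parts)
-- ===== Notes on version B (the rewrite author's own statement) =====
-- stated objective: alternative
-- what changed: Replaced A's per-cell 'previous'-state machine (nested column/row loops mutating sentence and previous) by flattening the matrix column-major once and then scanning maximal runs of equal isalpha()-ness, joining alphabetic runs and collapsing each non-leading non-alphabetic run to one space.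
import Mathlib
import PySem

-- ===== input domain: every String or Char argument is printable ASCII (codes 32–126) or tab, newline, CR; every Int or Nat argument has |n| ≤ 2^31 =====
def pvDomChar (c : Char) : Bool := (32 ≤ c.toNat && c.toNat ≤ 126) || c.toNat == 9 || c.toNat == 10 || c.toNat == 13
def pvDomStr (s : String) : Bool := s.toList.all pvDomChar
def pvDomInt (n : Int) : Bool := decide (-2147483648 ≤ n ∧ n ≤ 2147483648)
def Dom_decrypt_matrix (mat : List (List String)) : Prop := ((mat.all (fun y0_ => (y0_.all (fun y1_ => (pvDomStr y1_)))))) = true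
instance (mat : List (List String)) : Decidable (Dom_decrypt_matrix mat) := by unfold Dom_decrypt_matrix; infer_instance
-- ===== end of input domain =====

-- B replaces A's per-cell previous-state machine by a column-major flatten plus a
-- run-grouping scan (alternative decomposition, same asymptotic cost).
-- ===== PORT A =====
-- nested for-loops over range(len(mat[0])) and mat, state (sentence, previous);
-- row[col] is PySem.List.pyGetD (in range under Pre_decrypt_matrix).
def decrypt_matrix (mat : List (List String)) : String :=
  (((PySem.List.pyRange 0 ((PySem.List.pyGetD mat 0 []).length) 1).foldl
    (fun (st : String × String) col =>
      mat.foldl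
        (fun (st : String × String) row =>
          let c := PySem.List.pyGetD row col ""
          if PySem.Str.strIsalpha c == true then (st.1 ++ c, c)
          else if PySem.Str.strIsalpha c == false && PySem.Str.strIsalpha st.2 == false then (st.1, c)
          else (st.1 ++ " ", c))
        st)
    ("", "")).1)

-- ===== PORT B =====
-- the outer while loop of Source B: consume one maximal run of equal isalpha()-ness per step
-- (the inner while advancing j is the takeWhile/dropWhile split of the same run).
def pvRuns : List String → List String → List String
  | [], parts => parts
  | c :: cs, parts =>
    let k := PySem.Str.strIsalpha c
    let run := cs.takeWhile (fun x => PySem.Str.strIsalpha x == k)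
    let rest := cs.dropWhile (fun x => PySem.Str.strIsalpha x == k)
    pvRuns rest
      (if k then parts ++ [PySem.Str.join "" (c :: run)]
       else if parts ≠ [] then parts ++ [" "] else parts)
  termination_by cells _ => cells.length
  decreasing_by simpa using Nat.lt_succ_of_le (List.length_dropWhile_le _ _)

def decrypt_matrix_alt (mat : List (List String)) : String :=
  let cells := (PySem.List.pyRange 0 ((PySem.List.pyGetD mat 0 []).length) 1).flatMap
      (fun col => mat.map (fun row => PySem.List.pyGetD row col ""))
  PySem.Str.join "" (pvRuns cells [])

-- ===== PRECONDITION & SPEC =====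
-- Pre_ excludes exactly the inputs on which Python A raises IndexError:
-- the empty matrix (mat[0]) and ragged matrices with some row shorter than mat[0].
def Pre_decrypt_matrix (mat : List (List String)) : Prop :=
  mat ≠ [] ∧ ∀ row ∈ mat, (mat.headD []).length ≤ row.length
instance (mat : List (List String)) : Decidable (Pre_decrypt_matrix mat) := by
  unfold Pre_decrypt_matrix; infer_instance
def pvWitness_decrypt_matrix : List (List String) := [["he", "o"], ["ll", "!"]]
def Spec_decrypt_matrix (mat : List (List String)) (out : String) : Prop := out = decrypt_matrix_alt mat
instance (mat : List (List String)) (out : String) : Decidable (Spec_decrypt_matrix mat out) := by unfold Spec_decrypt_matrix; infer_instance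

-- ===== CLAIM (what is proved, stated in full; the proofs are below) =====
def Claim_equal_decrypt_matrix : Prop := ∀ (mat : List (List String)), Dom_decrypt_matrix mat → Pre_decrypt_matrix mat → Spec_decrypt_matrix mat (decrypt_matrix mat)

-- ===== LEMMAS AND PROOFS =====

-- A's per-cell step, named for the proofs
def pvStep (st : String × String) (c : String) : String × String :=
  if PySem.Str.strIsalpha c == true then (st.1 ++ c, c)
  else if PySem.Str.strIsalpha c == false && PySem.Str.strIsalpha st.2 == false then (st.1, c)
  else (st.1 ++ " ", c)

-- reference function: output of the rest of the scan given whether the previous cell was alphabetic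
def pvF : Bool → List String → String
  | _, [] => ""
  | b, c :: cs =>
    if PySem.Str.strIsalpha c then c ++ pvF true cs
    else if b then " " ++ pvF false cs else pvF false cs

theorem pvJoin_nil : PySem.Str.join "" ([] : List String) = "" := by decide

theorem pvJoin_cons (s : String) (l : List String) :
    PySem.Str.join "" (s :: l) = s ++ PySem.Str.join "" l := by
  apply String.ext
  cases l <;> simp [PySem.Str.join, PySem.Chars.join, List.intercalate]

theorem pvJoin_append_singleton (l : List String) (x : String) :
    PySem.Str.join "" (l ++ [x]) = PySem.Str.join "" l ++ x := by
  induction l with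
  | nil => simp [pvJoin_cons, pvJoin_nil]
  | cons a t ih => simp [pvJoin_cons, ih, String.append_assoc]

-- A's fold over any cell list computes pvF
theorem pvA_fold (cells : List String) : ∀ (s prev : String),
    (cells.foldl pvStep (s, prev)).1 = s ++ pvF (PySem.Str.strIsalpha prev) cells := by
  induction cells with
  | nil => intro s prev; simp [pvF, String.append_empty]
  | cons c cs ih =>
    intro s prev
    rw [List.foldl_cons]
    cases hc : PySem.Str.strIsalpha c with
    | true =>
      have hc' : PySem.Chars.strIsalpha c.toList = true := by simpa using hc
      have hstep : pvStep (s, prev) c = (s ++ c, c) := by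
        simp only [pvStep, hc]; rfl
      rw [hstep, ih, hc]
      simp [pvF, hc', String.append_assoc]
    | false =>
      cases hp : PySem.Str.strIsalpha prev with
      | false =>
        have hc' : PySem.Chars.strIsalpha c.toList = false := by simpa using hc
        have hstep : pvStep (s, prev) c = (s, c) := by
          simp only [pvStep, hc, hp]; rfl
        rw [hstep, ih, hc]
        simp [pvF, hc']
      | true =>
        have hc' : PySem.Chars.strIsalpha c.toList = false := by simpa using hc
        have hstep : pvStep (s, prev) c = (s ++ " ", c) := by
          simp only [pvStep, hc, hp]; rfl
        rw [hstep, ih, hc]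
        simp [pvF, hc', String.append_assoc]

-- pvF ignores its flag when the list is empty or starts with an alphabetic cell
theorem pvF_flag_irrel (cells : List String)
    (h : ∀ c, cells.head? = some c → PySem.Str.strIsalpha c = true) (b b' : Bool) :
    pvF b cells = pvF b' cells := by
  cases cells with
  | nil => rfl
  | cons c cs =>
    have hc' : PySem.Chars.strIsalpha c.toList = true := by simpa using h c rfl
    simp [pvF, hc']

-- pvF on an alphabetic run
theorem pvF_alpha_run (run : List String) : ∀ (c : String) (rest : List String) (b : Bool),
    PySem.Str.strIsalpha c = true → (∀ x ∈ run, PySem.Str.strIsalpha x = true) →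
    pvF b (c :: (run ++ rest)) = PySem.Str.join "" (c :: run) ++ pvF true rest := by
  induction run with
  | nil =>
    intro c rest b hc _
    have hc' : PySem.Chars.strIsalpha c.toList = true := by simpa using hc
    simp [pvF, hc', pvJoin_cons, pvJoin_nil, String.append_empty]
  | cons a t ih =>
    intro c rest b hc hall
    have ha : PySem.Str.strIsalpha a = true := hall a (by simp)
    have ht : ∀ x ∈ t, PySem.Str.strIsalpha x = true := fun x hx => hall x (by simp [hx])
    calc pvF b (c :: ((a :: t) ++ rest))
        = c ++ pvF true (a :: (t ++ rest)) := by
          have hc' : PySem.Chars.strIsalpha c.toList = true := by simpa using hc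
          rw [List.cons_append]
          simp [pvF, hc']
      _ = c ++ (PySem.Str.join "" (a :: t) ++ pvF true rest) := by rw [ih a rest true ha ht]
      _ = PySem.Str.join "" (c :: a :: t) ++ pvF true rest := by
          rw [pvJoin_cons c (a :: t), String.append_assoc]

-- pvF on a non-alphabetic run
theorem pvF_nonalpha_run (run : List String) : ∀ (c : String) (rest : List String) (b : Bool),
    PySem.Str.strIsalpha c = false → (∀ x ∈ run, PySem.Str.strIsalpha x = false) →
    pvF b (c :: (run ++ rest)) = (if b then " " else "") ++ pvF false rest := by
  induction run with
  | nil =>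
    intro c rest b hc _
    have hc' : PySem.Chars.strIsalpha c.toList = false := by simpa using hc
    cases b <;> simp [pvF, hc']
  | cons a t ih =>
    intro c rest b hc hall
    have ha : PySem.Str.strIsalpha a = false := hall a (by simp)
    have ht : ∀ x ∈ t, PySem.Str.strIsalpha x = false := fun x hx => hall x (by simp [hx])
    calc pvF b (c :: ((a :: t) ++ rest))
        = (if b then " " else "") ++ pvF false (a :: (t ++ rest)) := by
          have hc' : PySem.Chars.strIsalpha c.toList = false := by simpa using hc
          cases b <;> simp [pvF, hc']
      _ = (if b then " " else "") ++ ((if false then " " else "") ++ pvF false rest) := by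
          rw [ih a rest false ha ht]
      _ = (if b then " " else "") ++ pvF false rest := by simp
    


-- B's run scan computes pvF, flag = "some part already emitted"
theorem pvB_runs_aux (N : Nat) : ∀ (cells : List String), cells.length ≤ N → ∀ (parts : List String),
    PySem.Str.join "" (pvRuns cells parts) =
      PySem.Str.join "" parts ++ pvF (!parts.isEmpty) cells := by
  induction N with
  | zero =>
    intro cells hlen parts
    have : cells = [] := by cases cells <;> simp_all
    subst this
    simp [pvRuns, pvF, String.append_empty]
  | succ N ih =>
    intro cells hlen parts
    cases cells with
    | nil => simp [pvRuns, pvF, String.append_empty]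
    | cons c cs =>
      rw [pvRuns]
      set k := PySem.Str.strIsalpha c with hk
      set p : String → Bool := fun x => PySem.Str.strIsalpha x == k with hp
      have hsplit : cs.takeWhile p ++ cs.dropWhile p = cs := List.takeWhile_append_dropWhile
      have hrunall : ∀ x ∈ cs.takeWhile p, PySem.Str.strIsalpha x = k := by
        intro x hx
        have := List.mem_takeWhile_imp hx
        simpa [hp] using this
      have hresthead : ∀ x, (cs.dropWhile p).head? = some x → PySem.Str.strIsalpha x = (!k) := by
        intro x hx
        have h2 : p x = false := by
          have h0 := List.head?_dropWhile_not p cs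
          rw [hx] at h0
          exact h0
        cases h3 : PySem.Str.strIsalpha x <;> cases hkv : k <;>
          simp [hp, hkv] at h2 ⊢ <;> simp_all
      have hlen2 : (cs.dropWhile p).length ≤ N := by
        have := List.length_dropWhile_le p cs
        simp at hlen
        omega
      cases hkv : k with
      | true =>
        rw [if_pos rfl]
        rw [ih _ hlen2, pvJoin_append_singleton]
        have hfa : pvF (!parts.isEmpty) (c :: cs) =
            PySem.Str.join "" (c :: cs.takeWhile p) ++ pvF true (cs.dropWhile p) := by
          conv_lhs => rw [← hsplit]
          exact pvF_alpha_run (cs.takeWhile p) c (cs.dropWhile p) (!parts.isEmpty)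
            (by rw [← hk, hkv]) (fun x hx => by rw [hrunall x hx, hkv])
        have hne : (!(parts ++ [PySem.Str.join "" (c :: List.takeWhile p cs)]).isEmpty) = true := by
          simp
        rw [hne, hfa, String.append_assoc]
      | false =>
        rw [if_neg Bool.false_ne_true]
        have hfn : pvF (!parts.isEmpty) (c :: cs) =
            (if (!parts.isEmpty) then " " else "") ++ pvF false (cs.dropWhile p) := by
          conv_lhs => rw [← hsplit]
          exact pvF_nonalpha_run (cs.takeWhile p) c (cs.dropWhile p) (!parts.isEmpty)
            (by rw [← hk, hkv]) (fun x hx => by rw [hrunall x hx, hkv])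
        have hff : pvF false (cs.dropWhile p) = pvF true (cs.dropWhile p) := by
          apply pvF_flag_irrel
          intro x hx
          have := hresthead x hx
          rw [hkv] at this
          simpa using this
        by_cases hpe : parts = []
        · subst hpe
          rw [if_neg (by simp)]
          rw [ih _ hlen2, hfn]
          simp only [List.isEmpty_nil, Bool.not_true, Bool.false_eq_true, ite_false]
          rw [hff]
          simp
        · rw [if_pos hpe]
          rw [ih _ hlen2, pvJoin_append_singleton, hfn]
          have h1 : (!parts.isEmpty) = true := by simp [hpe]
          have h2 : (!(parts ++ [" "]).isEmpty) = true := by simp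
          rw [h1, h2, ← hff]
          simp [String.append_assoc]

theorem pvB_runs (cells : List String) (parts : List String) :
    PySem.Str.join "" (pvRuns cells parts) =
      PySem.Str.join "" parts ++ pvF (!parts.isEmpty) cells :=
  pvB_runs_aux cells.length cells le_rfl parts

-- ===== VERDICT (by name: the statement is the Claim_ definition above) =====
theorem decrypt_matrix_spec : Claim_equal_decrypt_matrix := by
  intro mat _ _
  show decrypt_matrix mat = decrypt_matrix_alt mat
  have hfun : (fun (st : String × String) (col : Int) =>
      mat.foldl (fun (st : String × String) row =>
          let c := PySem.List.pyGetD row col ""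
          if PySem.Str.strIsalpha c == true then (st.1 ++ c, c)
          else if PySem.Str.strIsalpha c == false && PySem.Str.strIsalpha st.2 == false then (st.1, c)
          else (st.1 ++ " ", c)) st)
      = (fun (st : String × String) (col : Int) =>
          (mat.map (fun row => PySem.List.pyGetD row col "")).foldl pvStep st) := by
    funext st col
    rw [List.foldl_map]
    rfl
  unfold decrypt_matrix decrypt_matrix_alt
  rw [hfun, ← List.foldl_flatMap, pvA_fold, pvB_runs, pvJoin_nil]
  have h0 : PySem.Str.strIsalpha "" = false := by decide
  rw [h0]
  simp
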